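-- pv_equiv track=rewrite | github.com/primeop/practice | 1_http_log_parser/solution.py | count_requests_to_path_with_method
-- ===== SOURCE A (Python) =====
-- def parse_log_line(line: str):
--     """Parse one log line. Returns dict with method, path, status or None if invalid."""
--     line = line.strip()
--     if not line:
--         return None
--     parts = line.split()
--     if len(parts) != 3:
--         return None
--     method, path, status_str = parts
--     if not status_str.isdigit():
--         return None
--     return {"method": method, "path": path, "status": int(status_str)}
--
-- def count_requests_to_path_with_method(log_lines: list, path: str, method: str = None) -> int:
--     """
--     F1: Count requests to path; if method is provided, count only that method.
--     Example:
--         count_requests_to_path_with_method(logs, "/api/users")           -> 3   # all methods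
--         count_requests_to_path_with_method(logs, "/api/users", "GET")   -> 3   # only GET
--         count_requests_to_path_with_method(logs, "/api/orders", "POST")  -> 1
--     """
--     count = 0
--     for line in log_lines:
--         parsed = parse_log_line(line)
--         if parsed and parsed["path"] == path:
--             if method is None or parsed["method"] == method:
--                 count += 1
--     return count
-- ===== SOURCE B (Python) =====
-- def parse_log_line(line: str):
--     """Parse one log line. Returns dict with method, path, status or None if invalid."""
--     line = line.strip()
--     if not line:
--         return None
--     parts = line.split()
--     if len(parts) != 3:
--         return None
--     method, path, status_str = parts
--     if not status_str.isdigit():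
--         return None
--     return {"method": method, "path": path, "status": int(status_str)}
--
-- def count_requests_to_path_with_method(log_lines: list, path: str, method: str = None) -> int:
--     # Build a frequency table keyed by (path, method) once, then answer the
--     # query by table lookup (or by summing the path's row) instead of rescanning.
--     records = (parse_log_line(line) for line in log_lines)
--     keys = [(r["path"], r["method"]) for r in records if r is not None]
--     table = {}
--     for k in keys:
--         table[k] = table.get(k, 0) + 1
--     if method is not None:
--         return table.get((path, method), 0)
--     return sum(n for (p, _m), n in table.items() if p == path)
-- ===== Notes on version B (the rewrite author's own statement) =====
-- stated objective: alternative
-- what changed: A keeps a single scalar counter and tests each parsed line against the query inside the scan; B first builds a frequency table keyed by (path, method) from all valid lines and then answers the query by table lookup (or by summing the matching path's entries when method is None).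
import Mathlib
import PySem

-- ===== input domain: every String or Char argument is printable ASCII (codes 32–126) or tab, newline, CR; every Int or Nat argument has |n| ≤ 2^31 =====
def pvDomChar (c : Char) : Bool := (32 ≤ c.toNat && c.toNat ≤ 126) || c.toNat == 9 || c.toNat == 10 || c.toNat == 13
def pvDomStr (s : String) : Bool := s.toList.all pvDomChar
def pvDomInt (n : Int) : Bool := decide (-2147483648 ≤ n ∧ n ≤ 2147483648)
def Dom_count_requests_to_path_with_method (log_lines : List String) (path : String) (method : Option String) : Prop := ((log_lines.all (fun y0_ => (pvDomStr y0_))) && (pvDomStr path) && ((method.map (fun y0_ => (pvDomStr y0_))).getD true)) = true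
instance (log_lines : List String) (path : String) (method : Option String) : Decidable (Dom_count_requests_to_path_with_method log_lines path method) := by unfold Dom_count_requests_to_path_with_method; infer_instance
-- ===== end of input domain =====

-- B builds a (path, method)-keyed frequency table once and answers the query by lookup
-- (or by summing the path's row) instead of testing the query inside the scan; same cost.

-- ===== PORT A =====
-- shared module helper; the Python record {"method":…, "path":…, "status":…} is ported as
-- the tuple (method, path, status). int(status_str) is ported with PySem.Int.ofStr? (exact);
-- the .getD 0 is unreachable because status_str.isdigit() holds there.
def parse_log_line (line : String) : Option (String × String × Int) :=
  let line := PySem.Str.strip line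
  if line = "" then none
  else
    let parts := PySem.Str.split₀ line
    match parts with
    | [method, path, status_str] =>
      if ¬ PySem.Str.strIsdigit status_str then none
      else some (method, path, (PySem.Int.ofStr? status_str).getD 0)
    | _ => none

def count_requests_to_path_with_method (log_lines : List String) (path : String) (method : Option String) : Int :=
  log_lines.foldl (fun count line =>
    match parse_log_line line with
    | some parsed =>
      if parsed.2.1 = path then
        if method = none ∨ some parsed.1 = method then count + 1 else count
      else count
    | none => count) 0

-- ===== PORT B =====
def count_requests_to_path_with_method_alt (log_lines : List String) (path : String) (method : Option String) : Int :=
  let keys : List (String × String) :=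
    (log_lines.filterMap parse_log_line).map (fun r => (r.2.1, r.1))
  let table : PySem.Dict (String × String) Int :=
    keys.foldl (fun d k => d.insert k (d.getD k 0 + 1)) PySem.Dict.empty
  match method with
  | some m => table.getD (path, m) 0
  | none => table.items.foldl (fun s kv => if kv.1.1 = path then s + kv.2 else s) 0

-- ===== PRECONDITION & SPEC =====
def Spec_count_requests_to_path_with_method (log_lines : List String) (path : String) (method : Option String) (out : Int) : Prop := out = count_requests_to_path_with_method_alt log_lines path method
instance (log_lines : List String) (path : String) (method : Option String) (out : Int) : Decidable (Spec_count_requests_to_path_with_method log_lines path method out) := by unfold Spec_count_requests_to_path_with_method; infer_instance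

-- ===== CLAIM (what is proved, stated in full; the proofs are below) =====
def Claim_equal_count_requests_to_path_with_method : Prop := ∀ (log_lines : List String) (path : String) (method : Option String), Dom_count_requests_to_path_with_method log_lines path method → Spec_count_requests_to_path_with_method log_lines path method (count_requests_to_path_with_method log_lines path method)

-- ===== LEMMAS AND PROOFS =====

-- A's scan counts the lines whose (path, method) key satisfies the query predicate.
def pvQueryP (path : String) (method : Option String) (k : String × String) : Bool :=
  decide (k.1 = path) && decide (method = none ∨ some k.2 = method)

lemma A_eq_countP (log_lines : List String) (path : String) (method : Option String) (c : Int) :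
    log_lines.foldl (fun count line =>
      match parse_log_line line with
      | some parsed =>
        if parsed.2.1 = path then
          if method = none ∨ some parsed.1 = method then count + 1 else count
        else count
      | none => count) c
    = c + (((log_lines.filterMap parse_log_line).map (fun r => (r.2.1, r.1))).countP
            (pvQueryP path method) : Int) := by
  induction log_lines generalizing c with
  | nil => simp
  | cons hd tl ih =>
    rw [List.foldl_cons, List.filterMap_cons]
    cases hparse : parse_log_line hd with
    | none => rw [ih]
    | some r =>
      simp only [List.map_cons, List.countP_cons]
      rw [ih]
      by_cases h1 : r.2.1 = path <;> by_cases h2 : method = none ∨ some r.1 = method <;>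
        simp [h1, h2, pvQueryP] <;> push_cast <;> ring

-- turn the accumulating if-fold into a sum
lemma foldl_ite_add {K : Type} (P : K → Prop) [DecidablePred P] (f : K → Int) (l : List K) (a : Int) :
    l.foldl (fun s k => if P k then s + f k else s) a
    = a + (l.map (fun k => if P k then f k else 0)).sum := by
  induction l generalizing a with
  | nil => simp
  | cons hd tl ih => simp only [List.foldl_cons, List.map_cons, List.sum_cons]; split_ifs <;> rw [ih] <;> ring

lemma sum_indicator {K : Type} [DecidableEq K] (P : K → Prop) [DecidablePred P] (a : K) (l : List K) (h : l.Nodup) :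
    (l.map (fun k => if P k ∧ k = a then (1:Int) else 0)).sum
    = if P a ∧ a ∈ l then 1 else 0 := by
  induction l with
  | nil => simp
  | cons hd tl ih =>
    simp only [List.nodup_cons] at h
    by_cases hha : hd = a
    · subst hha
      have : (tl.map (fun k => if P k ∧ k = hd then (1:Int) else 0)).sum = 0 := by
        apply List.sum_eq_zero
        intro x hx
        simp only [List.mem_map] at hx
        obtain ⟨k, hk, rfl⟩ := hx
        have : ¬ (k = hd) := fun e => h.1 (e ▸ hk)
        simp [this]
      simp [this, h.1]
    · simp only [List.map_cons, List.sum_cons, ih h.2]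
      have : ¬ (P hd ∧ hd = a) := fun ⟨_, e⟩ => hha e
      by_cases hm : a ∈ tl <;> simp [this, hha, Ne.symm hha, hm]

lemma sum_counts_nodup {K : Type} [DecidableEq K] [BEq K] [LawfulBEq K]
    (P : K → Prop) [DecidablePred P] (keys : List K) (l : List K) (h : l.Nodup) :
    (l.map (fun k => if P k then (keys.count k : Int) else 0)).sum
    = (keys.countP (fun x => decide (P x) && decide (x ∈ l)) : Int) := by
  induction keys with
  | nil => simp
  | cons a tail ih =>
    have step : ∀ k : K, (if P k then (((a :: tail).count k : Nat) : Int) else 0)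
        = (if P k then (tail.count k : Int) else 0) + (if P k ∧ k = a then (1:Int) else 0) := by
      intro k
      by_cases hp : P k
      · by_cases hk : k = a
        · subst hk; simp [hp, List.count_cons_self]
        · simp [hp, hk, Ne.symm hk]
      · simp [hp]
    calc (l.map (fun k => if P k then ((a :: tail).count k : Int) else 0)).sum
        = (l.map (fun k => (if P k then (tail.count k : Int) else 0) + (if P k ∧ k = a then (1:Int) else 0))).sum := by
          congr 1; exact List.map_congr_left (fun k _ => step k)
      _ = (l.map (fun k => if P k then (tail.count k : Int) else 0)).sum
          + (l.map (fun k => if P k ∧ k = a then (1:Int) else 0)).sum := by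
          rw [← List.sum_map_add]
      _ = (tail.countP (fun x => decide (P x) && decide (x ∈ l)) : Int) + (if P a ∧ a ∈ l then 1 else 0) := by
          rw [ih, sum_indicator P a l h]; split_ifs <;> rfl
      _ = ((a :: tail).countP (fun x => decide (P x) && decide (x ∈ l)) : Int) := by
          rw [List.countP_cons]
          by_cases hp : P a <;> by_cases hm : a ∈ l <;> simp [hp, hm]


lemma sum_row_eq_countP (keys : List (String × String)) (path : String) :
    ((PySem.Dict.counter keys).items.foldl (fun s kv => if kv.1.1 = path then s + kv.2 else s) 0)
    = (keys.countP (fun k => decide (k.1 = path)) : Int) := by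
  rw [PySem.Dict.items_counter, List.foldl_map]
  simp only []
  rw [foldl_ite_add (fun k : String × String => k.1 = path) (fun k => (keys.count k : Int))
        (PySem.Set.ofList keys) 0,
      sum_counts_nodup (fun k : String × String => k.1 = path) keys (PySem.Set.ofList keys)
        (PySem.Set.nodup_ofList keys)]
  simp only [zero_add]
  congr 1
  apply List.countP_congr
  intro k hk
  simp [PySem.Set.mem_ofList, hk]

-- ===== VERDICT (by name: the statement is the Claim_ definition above) =====
theorem count_requests_to_path_with_method_spec : Claim_equal_count_requests_to_path_with_method := by
  intro log_lines path method _
  unfold Spec_count_requests_to_path_with_method count_requests_to_path_with_method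
    count_requests_to_path_with_method_alt
  rw [A_eq_countP]
  simp only [PySem.Dict.foldl_insert_getD_add_one_eq_counter]
  cases method with
  | none =>
    dsimp only
    rw [sum_row_eq_countP]
    simp only [zero_add]
    congr 1
    apply List.countP_congr
    intro k _
    simp [pvQueryP]
  | some m =>
    dsimp only
    rw [PySem.Dict.getD_counter]
    simp only [zero_add, List.count]
    congr 1
    apply List.countP_congr
    intro k _
    simp [pvQueryP, beq_iff_eq, Prod.ext_iff]
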